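-- pv_equiv track=rewrite | github.com/qqqqlss/Python-coding-test | 롤케이크 자르기.py | solution
-- ===== SOURCE A (Python) =====
-- def solution(topping):
--     answer = 0
--     a=set()
--     b=set()
--     first=[]
--     for i in range(len(topping)-1,-1,-1):
--         if topping[i] not in b:
--             first.append(i)
--             b.add(topping[i])
--     first.sort()
--     idx=0
--     for i in range(len(topping)):
--         a.add(topping[i])
--         if i==first[idx]:
--             b.remove(topping[i])
--             idx+=1
--         if len(a)==len(b):
--             answer+=1
--         elif len(a)>len(b):
--             break
--     return answer
-- ===== SOURCE B (Python) =====
-- def solution(topping):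
--     # staged passes: precompute prefix and suffix distinct-count arrays, then compare
--     pref = []
--     seen = set()
--     for t in topping:
--         seen.add(t)
--         pref.append(len(seen))
--     suf = []
--     seen = set()
--     for t in reversed(topping):
--         suf.append(len(seen))
--         seen.add(t)
--     suf.reverse()
--     return sum(1 for p, s in zip(pref, suf) if p == s)
-- ===== Notes on version B (the rewrite author's own statement) =====
-- stated objective: alternative
-- what changed: B replaces A's single interleaved scan (live left set vs right set emptied via a precomputed, sorted last-occurrence index list with an idx pointer and an early break) by two independent staged passes that precompute a prefix distinct-count array and a suffix distinct-count array, followed by a pure zip comparison counting equal pairs; no structure is removed from during the count and the sort, index list and break disappear.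
import Mathlib
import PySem

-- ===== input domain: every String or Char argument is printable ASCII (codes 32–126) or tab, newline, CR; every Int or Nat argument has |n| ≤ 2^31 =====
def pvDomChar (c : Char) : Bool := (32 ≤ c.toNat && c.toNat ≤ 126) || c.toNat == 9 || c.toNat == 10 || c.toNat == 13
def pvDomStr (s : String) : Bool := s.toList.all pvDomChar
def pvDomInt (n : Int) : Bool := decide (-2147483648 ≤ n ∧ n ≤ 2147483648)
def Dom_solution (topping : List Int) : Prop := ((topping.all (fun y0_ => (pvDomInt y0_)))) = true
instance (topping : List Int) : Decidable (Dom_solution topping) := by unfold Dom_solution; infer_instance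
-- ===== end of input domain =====

-- B replaces A's interleaved scan with index machinery by two staged passes precomputing
-- prefix/suffix distinct-count arrays plus a final zip comparison (objective: alternative).

-- ===== PORT A =====
-- body of A's first for-loop (state = (b, first))
def solutionStep1 (topping : List Int) (st : PySem.Set Int × List Int) (i : Int) :
    PySem.Set Int × List Int :=
  if !(PySem.Set.contains st.1 (PySem.List.pyGetD topping i 0)) then
    (PySem.Set.add st.1 (PySem.List.pyGetD topping i 0), st.2 ++ [i])
  else st

-- A's second for-loop (it contains a `break`): structural recursion over the index list;
-- state = (a, b, idx, answer).  `first[idx]` / `topping[i]` are ported with pyGetD: on every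
-- reachable state the index is in range (this follows from the invariants proved below), so no
-- IndexError occurs.  `b.remove(topping[i])` is ported as Set.discard: the element is always
-- present there (same invariants), so no KeyError occurs.
def solutionLoop2 (topping first : List Int) : List Int → PySem.Set Int × PySem.Set Int × Int × Int → Int
  | [], st => st.2.2.2
  | i :: rest, st =>
    let t := PySem.List.pyGetD topping i 0
    let a := PySem.Set.add st.1 t
    let bIdx := if i == PySem.List.pyGetD first st.2.2.1 0
      then (PySem.Set.discard st.2.1 t, st.2.2.1 + 1)
      else (st.2.1, st.2.2.1)
    if PySem.Set.len a == PySem.Set.len bIdx.1 then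
      solutionLoop2 topping first rest (a, bIdx.1, bIdx.2, st.2.2.2 + 1)
    else if PySem.Set.len a > PySem.Set.len bIdx.1 then st.2.2.2
    else solutionLoop2 topping first rest (a, bIdx.1, bIdx.2, st.2.2.2)

def solution (topping : List Int) : Int :=
  let st1 := (PySem.List.pyRange (PySem.List.len topping - 1) (-1) (-1)).foldl
    (solutionStep1 topping) (PySem.Set.empty, [])
  let first := PySem.List.sorted st1.2 (fun x => x) false
  solutionLoop2 topping first (PySem.List.pyRange 0 (PySem.List.len topping) 1)
    (PySem.Set.empty, st1.1, 0, 0)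

-- ===== PORT B =====
-- B's first loop: seen.add(t); pref.append(len(seen))
def solutionAltPrefStep (st : PySem.Set Int × List Int) (t : Int) : PySem.Set Int × List Int :=
  let s := PySem.Set.add st.1 t
  (s, st.2 ++ [PySem.Set.len s])

-- B's second loop (over reversed(topping)): suf.append(len(seen)); seen.add(t)
def solutionAltSufStep (st : PySem.Set Int × List Int) (t : Int) : PySem.Set Int × List Int :=
  (PySem.Set.add st.1 t, st.2 ++ [PySem.Set.len st.1])

def solution_alt (topping : List Int) : Int :=
  let pref := (topping.foldl solutionAltPrefStep (PySem.Set.empty, [])).2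
  let suf := ((topping.reverse.foldl solutionAltSufStep (PySem.Set.empty, [])).2).reverse
  (pref.zip suf).foldl (fun acc p => if p.1 == p.2 then acc + 1 else acc) 0

-- ===== PRECONDITION & SPEC =====
def Spec_solution (topping : List Int) (out : Int) : Prop := out = solution_alt topping
instance (topping : List Int) (out : Int) : Decidable (Spec_solution topping out) := by unfold Spec_solution; infer_instance

-- ===== CLAIM (what is proved, stated in full; the proofs are below) =====
def Claim_equal_solution : Prop := ∀ (topping : List Int), Dom_solution topping → Spec_solution topping (solution topping)

-- ===== LEMMAS AND PROOFS =====

-- ascending list of the last-occurrence indices ≥ m, as Ints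
def lastOccsGe (t : List Int) (m : Nat) : List Int :=
  List.map (fun j => Int.ofNat j)
    ((List.range' m (t.length - m)).filter
      (fun j => !((t.drop (j+1)).contains (t.getD j 0))))

-- reference recursion shared by both proofs: scan the suffix, compare distinct counts; with break
def refA (s : PySem.Set Int) (r : List Int) (ans : Int) : Int :=
  match r with
  | [] => ans
  | t :: r' =>
    let s' := PySem.Set.add s t
    if s'.length = (PySem.Set.ofList r').length then refA s' r' (ans + 1)
    else if (PySem.Set.ofList r').length < s'.length then ans
    else refA s' r' ans

-- the same scan without the break
def refB (s : PySem.Set Int) (r : List Int) (ans : Int) : Int :=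
  match r with
  | [] => ans
  | t :: r' =>
    let s' := PySem.Set.add s t
    refB s' r' (if s'.length = (PySem.Set.ofList r').length then ans + 1 else ans)

theorem ofList_toFinset (l : List Int) : (PySem.Set.ofList l).toFinset = l.toFinset := by
  ext x
  simp [List.mem_toFinset, PySem.Set.mem_ofList]

theorem len_eq_distinct (s : PySem.Set Int) (l : List Int) (hn : s.Nodup)
    (h : ∀ x, x ∈ s ↔ x ∈ l) : s.length = (PySem.Set.ofList l).length := by
  have h1 : s.toFinset = l.toFinset := by
    ext x; simp [List.mem_toFinset, h x]
  have h2 := List.toFinset_card_of_nodup hn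
  have h3 := List.toFinset_card_of_nodup (PySem.Set.nodup_ofList (xs := l))
  rw [← h2, ← h3, ofList_toFinset, h1]

theorem distinct_cons_le (t : Int) (r : List Int) :
    (PySem.Set.ofList r).length ≤ (PySem.Set.ofList (t :: r)).length := by
  rw [← List.toFinset_card_of_nodup (PySem.Set.nodup_ofList (xs := r)),
    ← List.toFinset_card_of_nodup (PySem.Set.nodup_ofList (xs := t :: r)),
    ofList_toFinset, ofList_toFinset]
  exact Finset.card_le_card (by intro x hx; simp at hx ⊢; tauto)

theorem add_length_ge (s : PySem.Set Int) (t : Int) :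
    s.length ≤ (PySem.Set.add s t).length := by
  rw [PySem.Set.add_eq_ite]
  split <;> simp

theorem refB_const (r : List Int) : ∀ (s : PySem.Set Int) (ans : Int),
    (PySem.Set.ofList r).length < s.length → refB s r ans = ans := by
  induction r with
  | nil => intro s ans _; rfl
  | cons t r' ih =>
    intro s ans h
    have h1 := distinct_cons_le t r'
    have h2 := add_length_ge s t
    have hlt : (PySem.Set.ofList r').length < (PySem.Set.add s t).length := by omega
    simp only [refB]
    rw [if_neg (by omega), ih _ _ hlt]

theorem refA_eq_refB (r : List Int) : ∀ (s : PySem.Set Int) (ans : Int),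
    refA s r ans = refB s r ans := by
  induction r with
  | nil => intro s ans; rfl
  | cons t r' ih =>
    intro s ans
    simp only [refA, refB]
    by_cases h : (PySem.Set.add s t).length = (PySem.Set.ofList r').length
    · rw [if_pos h, if_pos h, ih]
    · rw [if_neg h, if_neg h]
      by_cases h2 : (PySem.Set.ofList r').length < (PySem.Set.add s t).length
      · rw [if_pos h2, refB_const _ _ _ h2]
      · rw [if_neg h2, ih]

-- ---------- B-side: staged arrays ----------

-- the prefix distinct-count list produced by B's first loop, head-recursively
def prefFrom (s : PySem.Set Int) : List Int → List Int
  | [] => []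
  | t :: r => PySem.Set.len (PySem.Set.add s t) :: prefFrom (PySem.Set.add s t) r

-- the raw (unreversed) list produced by B's second loop, head-recursively
def hSuf (s : PySem.Set Int) : List Int → List Int
  | [] => []
  | t :: l => PySem.Set.len s :: hSuf (PySem.Set.add s t) l

-- order-free distinct count of s ∪ r
def lenU (s : PySem.Set Int) (r : List Int) : Int := ((s.toFinset ∪ r.toFinset).card : Int)

-- the suffix distinct-count list (relative to an extra seen-set s)
def sufS : List Int → PySem.Set Int → List Int
  | [], _ => []
  | _ :: r, s => lenU s r :: sufS r s

-- zip-and-count recursion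
def zc : List Int → List Int → Int → Int
  | p :: ps, q :: qs, acc => zc ps qs (if p == q then acc + 1 else acc)
  | _, _, acc => acc

theorem foldl_pref (r : List Int) : ∀ (s : PySem.Set Int) (acc : List Int),
    (r.foldl solutionAltPrefStep (s, acc)).2 = acc ++ prefFrom s r := by
  induction r with
  | nil => intro s acc; simp [prefFrom]
  | cons t r ih =>
    intro s acc
    simp only [List.foldl_cons, solutionAltPrefStep, prefFrom, ih, List.append_assoc,
      List.singleton_append]

theorem foldl_suf (l : List Int) : ∀ (s : PySem.Set Int) (acc : List Int),
    (l.foldl solutionAltSufStep (s, acc)).2 = acc ++ hSuf s l := by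
  induction l with
  | nil => intro s acc; simp [hSuf]
  | cons t l ih =>
    intro s acc
    simp only [List.foldl_cons, solutionAltSufStep, hSuf, ih, List.append_assoc,
      List.singleton_append]

theorem add_toFinset (s : PySem.Set Int) (t : Int) :
    (PySem.Set.add s t).toFinset = insert t s.toFinset := by
  ext x
  simp [List.mem_toFinset, PySem.Set.mem_add]
  tauto

theorem len_eq_card (s : PySem.Set Int) (hn : s.Nodup) :
    PySem.Set.len s = (s.toFinset.card : Int) := by
  rw [List.toFinset_card_of_nodup hn]
  simp [PySem.Set.len]

theorem sufS_append (m : List Int) : ∀ (t : Int) (s : PySem.Set Int), s.Nodup →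
    sufS (m ++ [t]) s = sufS m (PySem.Set.add s t) ++ [PySem.Set.len s] := by
  induction m with
  | nil =>
    intro t s hn
    have hb : lenU s [] = PySem.Set.len s := by
      rw [len_eq_card s hn]; simp [lenU]
    simp [sufS, hb]
  | cons x m ih =>
    intro t s hn
    simp only [List.cons_append, sufS, ih t s hn, List.cons_append]
    congr 1
    unfold lenU
    have hu : s.toFinset ∪ (m ++ [t]).toFinset = (PySem.Set.add s t).toFinset ∪ m.toFinset := by
      rw [add_toFinset]; ext y; simp [List.toFinset_append]
    rw [hu]

theorem hSuf_reverse (l : List Int) : ∀ (s : PySem.Set Int), s.Nodup →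
    (hSuf s l).reverse = sufS l.reverse s := by
  induction l with
  | nil => intro s _; rfl
  | cons t l ih =>
    intro s hn
    simp only [hSuf, List.reverse_cons, ih (PySem.Set.add s t) (PySem.Set.nodup_add _ _ hn)]
    rw [← sufS_append _ _ _ hn]

theorem foldl_zip (ps : List Int) : ∀ (qs : List Int) (acc : Int),
    (ps.zip qs).foldl (fun acc p => if p.1 == p.2 then acc + 1 else acc) acc = zc ps qs acc := by
  induction ps with
  | nil => intro qs acc; cases qs <;> rfl
  | cons p ps ih =>
    intro qs acc
    cases qs with
    | nil => rfl
    | cons q qs => simp only [List.zip_cons_cons, List.foldl_cons, zc, ih]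

theorem zc_eq_refB (r : List Int) : ∀ (s : PySem.Set Int) (acc : Int), s.Nodup →
    zc (prefFrom s r) (sufS r PySem.Set.empty) acc = refB s r acc := by
  induction r with
  | nil => intro s acc _; rfl
  | cons t r ih =>
    intro s acc hn
    simp only [prefFrom, sufS, zc, refB]
    have hcond : (PySem.Set.len (PySem.Set.add s t) == lenU PySem.Set.empty r)
        = decide ((PySem.Set.add s t).length = (PySem.Set.ofList r).length) := by
      have h1 : lenU PySem.Set.empty r = ((PySem.Set.ofList r).length : Int) := by
        unfold lenU
        have hu : (PySem.Set.empty : PySem.Set Int).toFinset ∪ r.toFinset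
            = (PySem.Set.ofList r).toFinset := by
          rw [ofList_toFinset]; simp [PySem.Set.empty]
        rw [hu, List.toFinset_card_of_nodup (PySem.Set.nodup_ofList (xs := r))]
      rw [h1]
      by_cases h : (PySem.Set.add s t).length = (PySem.Set.ofList r).length
      · simp [PySem.Set.len, h]
      · simp [PySem.Set.len, h]
    rw [hcond]
    by_cases h : (PySem.Set.add s t).length = (PySem.Set.ofList r).length
    · simp only [h, decide_true, if_true]
      exact ih _ _ (PySem.Set.nodup_add _ _ hn)
    · simp only [h, decide_false, Bool.false_eq_true, if_false]
      exact ih _ _ (PySem.Set.nodup_add _ _ hn)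

theorem alt_eq_refB (topping : List Int) :
    solution_alt topping = refB PySem.Set.empty topping 0 := by
  have hne : (PySem.Set.empty : PySem.Set Int).Nodup := by simp [PySem.Set.empty]
  unfold solution_alt
  rw [foldl_pref, foldl_suf, List.nil_append, List.nil_append, hSuf_reverse _ _ hne,
    List.reverse_reverse, foldl_zip, zc_eq_refB _ _ _ hne]

-- ---------- lastOccsGe facts ----------

theorem lastOccsGe_len (t : List Int) : lastOccsGe t t.length = [] := by
  simp [lastOccsGe]

theorem range'_sub_succ (t : List Int) (m : Nat) (hm : m < t.length) :
    List.range' m (t.length - m) = m :: List.range' (m+1) (t.length - (m+1)) := by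
  have : t.length - m = (t.length - (m+1)) + 1 := by omega
  rw [this, List.range'_succ]

theorem lastOccsGe_cons_of_last (t : List Int) (m : Nat) (hm : m < t.length)
    (h : t.getD m 0 ∉ t.drop (m+1)) :
    lastOccsGe t m = (m : Int) :: lastOccsGe t (m+1) := by
  unfold lastOccsGe
  rw [range'_sub_succ t m hm, List.filter_cons]
  simp only [List.getD_eq_getElem?_getD] at h
  simp [h]

theorem lastOccsGe_eq_of_not_last (t : List Int) (m : Nat) (hm : m < t.length)
    (h : t.getD m 0 ∈ t.drop (m+1)) :
    lastOccsGe t m = lastOccsGe t (m+1) := by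
  unfold lastOccsGe
  rw [range'_sub_succ t m hm, List.filter_cons]
  simp only [List.getD_eq_getElem?_getD] at h
  simp [h]

theorem lastOccsGe_mem_ge (t : List Int) (m : Nat) (j : Int) (hj : j ∈ lastOccsGe t m) :
    (m : Int) ≤ j := by
  unfold lastOccsGe at hj
  rw [List.mem_map] at hj
  obtain ⟨i, hi, rfl⟩ := hj
  rw [List.mem_filter, List.mem_range'_1] at hi
  exact Int.ofNat_le.mpr hi.1.1

theorem lastOccsGe_ne_nil (t : List Int) (m : Nat) (hm : m < t.length) :
    lastOccsGe t m ≠ [] := by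
  have hmem : Int.ofNat (t.length - 1) ∈ lastOccsGe t m := by
    unfold lastOccsGe
    rw [List.mem_map]
    refine ⟨t.length - 1, ?_, rfl⟩
    rw [List.mem_filter, List.mem_range'_1]
    refine ⟨⟨by omega, by omega⟩, ?_⟩
    have : t.length - 1 + 1 = t.length := by omega
    simp [this]
  intro hnil
  rw [hnil] at hmem
  exact absurd hmem (List.not_mem_nil)

theorem lastOccsGe_pairwise (t : List Int) :
    (lastOccsGe t 0).Pairwise (fun a b => a < b) := by
  unfold lastOccsGe
  rw [List.pairwise_map]
  exact ((List.pairwise_lt_range' 1).filter _).imp (fun h => Int.ofNat_lt.mpr h)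

-- ---------- A's first loop ----------

theorem loop1_inv (t : List Int) : ∀ (m : Nat), m ≤ t.length →
    ∀ (b : PySem.Set Int) (first : List Int), b.Nodup → (∀ x, x ∈ b ↔ x ∈ t.drop m) →
    first = (lastOccsGe t m).reverse →
    (((PySem.List.pyRange ((m : Int) - 1) (-1) (-1)).foldl (solutionStep1 t) (b, first)).1.Nodup
    ∧ (∀ x, x ∈ ((PySem.List.pyRange ((m : Int) - 1) (-1) (-1)).foldl (solutionStep1 t) (b, first)).1 ↔ x ∈ t)
    ∧ ((PySem.List.pyRange ((m : Int) - 1) (-1) (-1)).foldl (solutionStep1 t) (b, first)).2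
        = (lastOccsGe t 0).reverse) := by
  intro m
  induction m with
  | zero =>
    intro _ b first hb hmem hf
    have h0 : ((0 : Nat) : Int) - 1 = -1 := by norm_num
    rw [h0, PySem.List.pyRange_neg_one_eq_nil (le_refl _)]
    refine ⟨hb, ?_, ?_⟩
    · simpa using hmem
    · simpa using hf
  | succ m ih =>
    intro hm b first hb hmem hf
    have hmlt : m < t.length := hm
    have hcast : (((m+1 : Nat)) : Int) - 1 = ((m : Nat) : Int) := by push_cast; ring
    rw [hcast, PySem.List.pyRange_neg_one_cons (by omega)]
    have hgd : t.getD m 0 = t[m] := List.getD_eq_getElem t 0 hmlt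
    by_cases hmem0 : t.getD m 0 ∈ t.drop (m+1)
    · have hstep : solutionStep1 t (b, first) ((m : Nat) : Int) = (b, first) := by
        unfold solutionStep1
        simp only [PySem.List.pyGetD_natCast]
        have hm' : t.getD m 0 ∈ b := (hmem _).mpr hmem0
        simp only [List.getD_eq_getElem?_getD] at hm'
        simp [hm']
      rw [List.foldl_cons, hstep]
      apply ih (le_of_lt hmlt) b first hb ?_ ?_
      · intro x
        rw [List.drop_eq_getElem_cons hmlt, hmem x, List.mem_cons]
        constructor
        · intro hx; exact Or.inr hx
        · rintro (h | h)
          · rw [h, ← hgd]; exact hmem0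
          · exact h
      · rw [hf, lastOccsGe_eq_of_not_last t m hmlt hmem0]
    · have hstep : solutionStep1 t (b, first) ((m : Nat) : Int)
          = (PySem.Set.add b (t.getD m 0), first ++ [((m : Nat) : Int)]) := by
        unfold solutionStep1
        simp only [PySem.List.pyGetD_natCast]
        have hm' : t.getD m 0 ∉ b := fun hc => hmem0 ((hmem _).mp hc)
        simp only [List.getD_eq_getElem?_getD] at hm'
        simp [hm']
      rw [List.foldl_cons, hstep]
      apply ih (le_of_lt hmlt) _ _ (PySem.Set.nodup_add _ _ hb) ?_ ?_
      · intro x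
        rw [PySem.Set.mem_add, List.drop_eq_getElem_cons hmlt, hmem x, List.mem_cons, hgd]
        tauto
      · rw [hf, lastOccsGe_cons_of_last t m hmlt hmem0, List.reverse_cons]

-- ---------- A's second loop computes refA ----------

theorem loop2_eq_refA (t : List Int) : ∀ (c m : Nat), m + c = t.length →
    ∀ (a b : PySem.Set Int) (k : Nat) (ans : Int),
    b.Nodup → (∀ x, x ∈ b ↔ x ∈ t.drop m) →
    (lastOccsGe t 0).drop k = lastOccsGe t m →
    solutionLoop2 t (lastOccsGe t 0) (PySem.List.pyRange (m : Int) (PySem.List.len t) 1)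
      (a, b, (k : Int), ans) = refA a (t.drop m) ans := by
  intro c
  induction c with
  | zero =>
    intro m hmc a b k ans hb hmem hk
    have hm : m = t.length := by omega
    subst hm
    rw [PySem.List.pyRange_one_eq_nil (by simp [PySem.List.len]), List.drop_length]
    rfl
  | succ c ih =>
    intro m hmc a b k ans hb hmem hk
    have hmlt : m < t.length := by omega
    have hlen : PySem.List.len t = (t.length : Int) := by simp [PySem.List.len]
    rw [hlen, PySem.List.pyRange_one_cons (by exact_mod_cast hmlt)]
    obtain ⟨j, l', heq⟩ : ∃ j l', lastOccsGe t m = j :: l' := by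
      cases hGe : lastOccsGe t m with
      | nil => exact absurd hGe (lastOccsGe_ne_nil t m hmlt)
      | cons j l' => exact ⟨j, l', rfl⟩
    have hfk : PySem.List.pyGetD (lastOccsGe t 0) (k : Int) 0 = j := by
      rw [PySem.List.pyGetD_natCast, List.getD_eq_getElem?_getD]
      have h0 : (List.drop k (lastOccsGe t 0))[0]? = (lastOccsGe t 0)[k + 0]? :=
        List.getElem?_drop
      rw [hk, heq] at h0
      simp only [List.getElem?_cons_zero, Nat.add_zero] at h0
      rw [← h0]
      rfl
    have hgd : t.getD m 0 = t[m] := List.getD_eq_getElem t 0 hmlt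
    have htm : PySem.List.pyGetD t ((m : Nat) : Int) 0 = t[m] := by
      rw [PySem.List.pyGetD_natCast]; exact hgd
    have hcast1 : ((m : Int) + 1) = (((m+1 : Nat)) : Int) := by push_cast; ring
    rw [List.drop_eq_getElem_cons hmlt]
    simp only [solutionLoop2, htm, hfk, refA]
    by_cases hL : t[m] ∈ t.drop (m+1)
    · -- m is NOT a last occurrence: the index machinery does not fire
      have hmm : lastOccsGe t m = lastOccsGe t (m+1) :=
        lastOccsGe_eq_of_not_last t m hmlt (hgd ▸ hL)
      have hjmem : j ∈ lastOccsGe t (m+1) := by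
        rw [← hmm, heq]; exact List.mem_cons_self
      have hjge : ((m+1 : Nat) : Int) ≤ j := lastOccsGe_mem_ge t (m+1) j hjmem
      have hne : ((m : Int) ≠ j) := by push_cast at hjge ⊢; omega
      have hcond : (((m : Int)) == j) = false := by simp [hne]
      rw [hcond]
      simp only [Bool.false_eq_true, if_false]
      have hmem' : ∀ x, x ∈ b ↔ x ∈ t.drop (m+1) := by
        intro x
        rw [hmem x, List.drop_eq_getElem_cons hmlt, List.mem_cons]
        constructor
        · rintro (h | h)
          · rw [h]; exact hL
          · exact h
        · intro h; exact Or.inr h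
      have hk' : (lastOccsGe t 0).drop k = lastOccsGe t (m+1) := by rw [hk, hmm]
      have hbl : b.length = (PySem.Set.ofList (t.drop (m+1))).length :=
        len_eq_distinct b _ hb hmem'
      have hrec := ih (m+1) (by omega) (PySem.Set.add a t[m]) b k
      rw [hcast1, ← hlen]
      by_cases hq1 : (PySem.Set.add a t[m]).length = (PySem.Set.ofList (t.drop (m+1))).length
      · have hc1 : (PySem.Set.len (PySem.Set.add a t[m]) == PySem.Set.len b) = true := by
          simp [PySem.Set.len, hq1, hbl]
        rw [if_pos hc1, if_pos hq1, hrec (ans + 1) hb hmem' hk']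
      · have hc1 : (PySem.Set.len (PySem.Set.add a t[m]) == PySem.Set.len b) = false := by
          simp [PySem.Set.len, hbl]; omega
        rw [hc1]
        simp only [Bool.false_eq_true, if_false]
        rw [if_neg hq1]
        by_cases hq2 : (PySem.Set.ofList (t.drop (m+1))).length < (PySem.Set.add a t[m]).length
        · have hg : PySem.Set.len (PySem.Set.add a t[m]) > PySem.Set.len b := by
            simp [PySem.Set.len, hbl]; exact_mod_cast hq2
          rw [if_pos hg, if_pos hq2]
        · have hg : ¬ (PySem.Set.len (PySem.Set.add a t[m]) > PySem.Set.len b) := by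
            simp [PySem.Set.len, hbl]; omega
          rw [if_neg hg, if_neg hq2, hrec ans hb hmem' hk']
    · -- m IS a last occurrence: A removes topping[m] from b and advances idx
      have hmm : lastOccsGe t m = ((m : Nat) : Int) :: lastOccsGe t (m+1) :=
        lastOccsGe_cons_of_last t m hmlt (hgd ▸ hL)
      obtain ⟨hj, hl'⟩ : j = ((m : Nat) : Int) ∧ l' = lastOccsGe t (m+1) := by
        have h := heq.symm.trans hmm
        rw [List.cons.injEq] at h
        exact h
      have hcond : (((m : Int)) == j) = true := by simp [hj]
      rw [hcond]
      simp only [if_true]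
      have hnd' : (PySem.Set.discard b t[m]).Nodup := PySem.Set.nodup_discard _ _ hb
      have hmem' : ∀ x, x ∈ PySem.Set.discard b t[m] ↔ x ∈ t.drop (m+1) := by
        intro x
        rw [PySem.Set.mem_discard, hmem x, List.drop_eq_getElem_cons hmlt, List.mem_cons]
        constructor
        · rintro ⟨h | h, hne⟩
          · exact absurd h hne
          · exact h
        · intro h
          refine ⟨Or.inr h, ?_⟩
          rintro rfl
          exact hL h
      have hk' : (lastOccsGe t 0).drop (k+1) = lastOccsGe t (m+1) := by
        have hdd : List.drop 1 (List.drop k (lastOccsGe t 0)) = (lastOccsGe t 0).drop (k+1) :=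
          List.drop_drop
        rw [← hdd, hk, heq, hl']
        rfl
      have hcast2 : ((k : Int) + 1) = (((k+1 : Nat)) : Int) := by push_cast; ring
      have hbl : (PySem.Set.discard b t[m]).length = (PySem.Set.ofList (t.drop (m+1))).length :=
        len_eq_distinct _ _ hnd' hmem'
      have hrec := ih (m+1) (by omega) (PySem.Set.add a t[m]) (PySem.Set.discard b t[m]) (k+1)
      rw [hcast1, hcast2, ← hlen]
      by_cases hq1 : (PySem.Set.add a t[m]).length = (PySem.Set.ofList (t.drop (m+1))).length
      · have hc1 : (PySem.Set.len (PySem.Set.add a t[m]) == PySem.Set.len (PySem.Set.discard b t[m])) = true := by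
          simp [PySem.Set.len, hq1, hbl]
        rw [if_pos hc1, if_pos hq1, hrec (ans + 1) hnd' hmem' hk']
      · have hc1 : (PySem.Set.len (PySem.Set.add a t[m]) == PySem.Set.len (PySem.Set.discard b t[m])) = false := by
          simp [PySem.Set.len, hbl]; omega
        rw [hc1]
        simp only [Bool.false_eq_true, if_false]
        rw [if_neg hq1]
        by_cases hq2 : (PySem.Set.ofList (t.drop (m+1))).length < (PySem.Set.add a t[m]).length
        · have hg : PySem.Set.len (PySem.Set.add a t[m]) > PySem.Set.len (PySem.Set.discard b t[m]) := by
            simp [PySem.Set.len, hbl]; exact_mod_cast hq2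
          rw [if_pos hg, if_pos hq2]
        · have hg : ¬ (PySem.Set.len (PySem.Set.add a t[m]) > PySem.Set.len (PySem.Set.discard b t[m])) := by
            simp [PySem.Set.len, hbl]; omega
          rw [if_neg hg, if_neg hq2, hrec ans hnd' hmem' hk']

theorem solution_spec_aux (topping : List Int) : solution topping = solution_alt topping := by
  -- A's first loop builds (b, first) = (all elements, descending last-occurrence indices)
  obtain ⟨hN, hM, hF⟩ := loop1_inv topping topping.length le_rfl PySem.Set.empty []
    (by simp [PySem.Set.empty])
    (by intro x; simp [PySem.Set.empty, List.drop_length])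
    (by rw [lastOccsGe_len]; rfl)
  have hsorted : PySem.List.sorted ((lastOccsGe topping 0).reverse) (fun x => x) false
      = lastOccsGe topping 0 :=
    PySem.List.sorted_eq_of_perm_of_pairwise_lt _ _ _ (List.reverse_perm _).symm
      (lastOccsGe_pairwise topping)
  have hA : solution topping = refA PySem.Set.empty topping 0 := by
    unfold solution
    simp only [PySem.List.len_eq]
    rw [hF, hsorted]
    have h2 := loop2_eq_refA topping topping.length 0 (by omega) PySem.Set.empty
      ((PySem.List.pyRange ((topping.length : Int) - 1) (-1) (-1)).foldl
        (solutionStep1 topping) (PySem.Set.empty, [])).1 0 0 hN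
      (by intro x; rw [hM x]; simp) (by simp)
    simpa using h2
  rw [hA, alt_eq_refB, refA_eq_refB]

-- ===== VERDICT (by name: the statement is the Claim_ definition above) =====
theorem solution_spec : Claim_equal_solution := by
  intro topping _
  unfold Spec_solution
  exact solution_spec_aux topping
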